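-- pv_equiv track=rewrite | github.com/razvanserban/hello-world | ProblemSolving/parentheses_cluster.py | groupCluster
-- ===== SOURCE A (Python) =====
-- def groupCluster(parentheses):
--     slicedParentheses = []
--     parenthesesGroup = ''
--     countOpen = 0
--     countClose = 0
--
--     for item in parentheses:
--         parenthesesGroup = parenthesesGroup + item
--         countOpen = parenthesesGroup.count('(')
--         countClose = parenthesesGroup.count(')')
--         if countOpen == countClose:
--             slicedParentheses.append(parenthesesGroup)
--             parenthesesGroup = ''
--
--     return slicedParentheses
-- ===== SOURCE B (Python) =====
-- def groupCluster(parentheses):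
--     clusters = []
--     start = 0
--     balance = 0
--     for i, ch in enumerate(parentheses):
--         if ch == '(':
--             balance += 1
--         elif ch == ')':
--             balance -= 1
--         if balance == 0:
--             clusters.append(parentheses[start:i + 1])
--             start = i + 1
--     return clusters
-- ===== Notes on version B (the rewrite author's own statement) =====
-- stated objective: alternative
-- what changed: Instead of rebuilding the group string and re-counting both bracket kinds over the whole accumulated group at every character, B keeps a running balance counter updated in constant time per character and cuts a slice of the input whenever the balance returns to zero.
import Mathlib
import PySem

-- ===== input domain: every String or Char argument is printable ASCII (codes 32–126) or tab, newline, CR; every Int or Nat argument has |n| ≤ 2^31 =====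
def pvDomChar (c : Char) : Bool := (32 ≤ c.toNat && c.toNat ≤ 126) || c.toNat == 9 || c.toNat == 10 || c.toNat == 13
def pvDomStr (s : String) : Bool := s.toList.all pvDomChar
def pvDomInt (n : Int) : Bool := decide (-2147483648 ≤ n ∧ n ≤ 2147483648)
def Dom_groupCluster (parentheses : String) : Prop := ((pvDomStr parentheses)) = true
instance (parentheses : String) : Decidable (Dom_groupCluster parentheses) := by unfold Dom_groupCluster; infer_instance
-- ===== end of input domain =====

-- B replaces A's per-character re-count of both bracket kinds over the accumulated group
-- with a running balance counter and slicing (objective: alternative algorithm).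

-- ===== PORT A =====
-- one loop iteration of A: append the char to the group, recount both parentheses, cut on equality
def pvStepA (st : List String × List Char) (item : Char) : List String × List Char :=
  let parenthesesGroup := st.2 ++ [item]
  let countOpen := PySem.Chars.count parenthesesGroup ['(']
  let countClose := PySem.Chars.count parenthesesGroup [')']
  if countOpen = countClose then (st.1 ++ [String.ofList parenthesesGroup], [])
  else (st.1, parenthesesGroup)

def groupCluster (parentheses : String) : List String :=
  (parentheses.toList.foldl pvStepA ([], [])).1

-- ===== PORT B =====
-- one loop iteration of B: update the running balance; when it hits 0, cut a slice of the input
def pvStepB (cs : List Char) (st : List String × Int × Int) (ic : Int × Char) :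
    List String × Int × Int :=
  let balance : Int :=
    if ic.2 = '(' then st.2.2 + 1 else if ic.2 = ')' then st.2.2 - 1 else st.2.2
  if balance = 0 then
    (st.1 ++ [String.ofList (PySem.List.slice cs (some st.2.1) (some (ic.1 + 1)))], ic.1 + 1, balance)
  else (st.1, st.2.1, balance)

def groupCluster_alt (parentheses : String) : List String :=
  let cs := parentheses.toList
  ((PySem.List.enumerate cs 0).foldl (pvStepB cs) ([], 0, 0)).1

-- ===== PRECONDITION & SPEC =====
def Spec_groupCluster (parentheses : String) (out : List String) : Prop := out = groupCluster_alt parentheses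
instance (parentheses : String) (out : List String) : Decidable (Spec_groupCluster parentheses out) := by unfold Spec_groupCluster; infer_instance

-- ===== CLAIM (what is proved, stated in full; the proofs are below) =====
def Claim_equal_groupCluster : Prop := ∀ (parentheses : String), Dom_groupCluster parentheses → Spec_groupCluster parentheses (groupCluster parentheses)

-- ===== LEMMAS AND PROOFS =====

-- str.count with a single-character needle is plain character counting
lemma pvCountGo_singleton (c : Char) (l : List Char) (fuel acc : Nat) (h : l.length ≤ fuel) :
    PySem.Chars.count.go [c] fuel l acc = acc + l.count c := by
  induction l generalizing fuel acc with
  | nil => cases fuel <;> simp [PySem.Chars.count.go]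
  | cons x t ih =>
      cases fuel with
      | zero => simp at h
      | succ f =>
          simp only [PySem.Chars.count.go, List.isPrefixOf, List.length_cons] at *
          by_cases hx : c = x
          · subst hx
            rw [if_pos (by simp)]
            simp only [List.length_nil, List.drop_succ_cons, List.drop_zero]
            rw [ih f (acc + 1) (by omega)]
            simp; omega
          · rw [if_neg (by simp [hx])]
            rw [ih f acc (by omega)]
            simp [Ne.symm hx]

lemma pvCount_singleton (c : Char) (l : List Char) :
    PySem.Chars.count l [c] = l.count c := by
  simp [PySem.Chars.count, pvCountGo_singleton c l l.length 0 le_rfl]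

-- main loop invariant: A's accumulated group is the slice of the input from B's start index,
-- and B's balance is the difference of the group's parenthesis counts
lemma pvLoop (cs : List Char) (rest : List Char) :
    ∀ (i start : Nat) (out : List String) (g : List Char),
      rest = cs.drop i → g = (cs.drop start).take (i - start) → start ≤ i →
      (rest.foldl pvStepA (out, g)).1 =
      ((PySem.List.enumerate rest (i : Int)).foldl (pvStepB cs)
        (out, (start : Int), (g.count '(' : Int) - (g.count ')' : Int))).1 := by
  induction rest with
  | nil => intro i start out g _ _ _; simp [PySem.List.enumerate]
  | cons c rest' ih =>
      intro i start out g hrest hg hstart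
      have hci : cs[i]? = some c := by
        rw [← List.head?_drop, ← hrest]; rfl
      have hrest' : rest' = cs.drop (i + 1) := by
        have : cs.drop (i + 1) = (cs.drop i).drop 1 := by
          rw [List.drop_drop]
        rw [this, ← hrest]; rfl
      have hg' : g ++ [c] = (cs.drop start).take (i + 1 - start) := by
        have h1 : i + 1 - start = (i - start) + 1 := by omega
        have h2 : (cs.drop start)[i - start]? = some c := by
          rw [List.getElem?_drop, Nat.add_sub_cancel' hstart, hci]
        rw [h1, List.take_add_one, ← hg, h2]; rfl
      rw [PySem.List.enumerate_cons]
      simp only [List.foldl_cons]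
      -- the new balance equals the parenthesis-count difference of the extended group
      have hbal : (if c = '(' then (g.count '(' : Int) - (g.count ')' : Int) + 1
                   else if c = ')' then (g.count '(' : Int) - (g.count ')' : Int) - 1
                   else (g.count '(' : Int) - (g.count ')' : Int))
          = ((g ++ [c]).count '(' : Int) - ((g ++ [c]).count ')' : Int) := by
        by_cases h1 : c = '(' <;> by_cases h2 : c = ')' <;>
          simp [h1, h2, List.count_append] <;> ring
      by_cases hcut : (g ++ [c]).count '(' = (g ++ [c]).count ')'
      · -- counts equal / balance zero: both cut
        have hA : pvStepA (out, g) c = (out ++ [String.ofList (g ++ [c])], []) := by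
          simp [pvStepA, pvCount_singleton, hcut]
        have hslice : PySem.List.slice cs (some (start : Int)) (some ((i : Int) + 1))
            = g ++ [c] := by
          have : ((i : Int) + 1) = ((i + 1 : Nat) : Int) := by push_cast; ring
          rw [this, PySem.List.slice_natCast, ← hg']
        have hB : pvStepB cs (out, (start : Int), (g.count '(' : Int) - (g.count ')' : Int))
              ((i : Int), c)
            = (out ++ [String.ofList (g ++ [c])], (i : Int) + 1, 0) := by
          have hz : ((g ++ [c]).count '(' : Int) - ((g ++ [c]).count ')' : Int) = 0 := by
            rw [hcut]; ring
          simp only [pvStepB, hbal]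
          rw [if_pos hz, hslice, hz]
        rw [hA, hB]
        have hi1 : ((i : Int) + 1) = ((i + 1 : Nat) : Int) := by push_cast; ring
        rw [hi1]
        have := ih (i + 1) (i + 1) (out ++ [String.ofList (g ++ [c])]) []
          hrest' (by simp) le_rfl
        simpa using this
      · -- counts differ / balance nonzero: both keep accumulating
        have hA : pvStepA (out, g) c = (out, g ++ [c]) := by
          have hcut' : ¬ (g.count '(' + [c].count '(' = g.count ')' + [c].count ')') := by
            simpa [List.count_append] using hcut
          simp [pvStepA, pvCount_singleton, hcut']
        have hnz : ((g ++ [c]).count '(' : Int) - ((g ++ [c]).count ')' : Int) ≠ 0 := by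
          intro h; apply hcut; omega
        have hB : pvStepB cs (out, (start : Int), (g.count '(' : Int) - (g.count ')' : Int))
              ((i : Int), c)
            = (out, (start : Int), ((g ++ [c]).count '(' : Int) - ((g ++ [c]).count ')' : Int)) := by
          simp only [pvStepB, hbal]
          rw [if_neg hnz]
        rw [hA, hB]
        exact ih (i + 1) start out (g ++ [c]) hrest' hg' (by omega)

-- ===== VERDICT (by name: the statement is the Claim_ definition above) =====
theorem groupCluster_spec : Claim_equal_groupCluster := by
  intro parentheses _
  unfold Spec_groupCluster groupCluster groupCluster_alt
  have := pvLoop parentheses.toList parentheses.toList 0 0 [] [] rfl rfl le_rfl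
  simpa using this
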